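-- pv_equiv track=rewrite | github.com/XiWang16/ccus-policy-debates-analysis | parliament/ccus_analysis/step2b_passage_extractor.py | _extract_passages
-- ===== SOURCE A (Python) =====
-- def _extract_passages(
--     paragraphs: list[str],
--     matching_indices: set[int],
--     context: int = 1,
-- ) -> list[str]:
--     """Return contiguous passage strings: matching paragraphs ± context paragraphs."""
--     if not matching_indices:
--         return []
--     window: set[int] = set()
--     n = len(paragraphs)
--     for i in matching_indices:
--         for j in range(max(0, i - context), min(n, i + context + 1)):
--             window.add(j)
--     passages: list[str] = []
--     run: list[int] = []
--     for i in sorted(window):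
--         if run and i > run[-1] + 1:
--             passages.append("\n".join(paragraphs[j] for j in run))
--             run = []
--         run.append(i)
--     if run:
--         passages.append("\n".join(paragraphs[j] for j in run))
--     return passages
-- ===== SOURCE B (Python) =====
-- def _extract_passages(
--     paragraphs: list[str],
--     matching_indices: set[int],
--     context: int = 1,
-- ) -> list[str]:
--     """Sort the indices, merge overlapping/adjacent clamped intervals, slice once per passage."""
--     n = len(paragraphs)
--     passages: list[str] = []
--     cur = None  # current merged interval (lo, hi), half-open
--     for i in sorted(matching_indices):
--         lo = max(0, i - context)
--         hi = min(n, i + context + 1)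
--         if hi <= lo:
--             continue
--         if cur is None:
--             cur = (lo, hi)
--         elif lo <= cur[1]:
--             cur = (cur[0], max(cur[1], hi))
--         else:
--             passages.append("\n".join(paragraphs[cur[0]:cur[1]]))
--             cur = (lo, hi)
--     if cur is not None:
--         passages.append("\n".join(paragraphs[cur[0]:cur[1]]))
--     return passages
-- ===== Notes on version B (the rewrite author's own statement) =====
-- stated objective: faster
-- what changed: Instead of materialising every covered paragraph index in a set and sorting that window, B sorts the k matching indices and merges the clamped [i-context, i+context+1) intervals in one pass, emitting each passage from a single list slice.
import Mathlib
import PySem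

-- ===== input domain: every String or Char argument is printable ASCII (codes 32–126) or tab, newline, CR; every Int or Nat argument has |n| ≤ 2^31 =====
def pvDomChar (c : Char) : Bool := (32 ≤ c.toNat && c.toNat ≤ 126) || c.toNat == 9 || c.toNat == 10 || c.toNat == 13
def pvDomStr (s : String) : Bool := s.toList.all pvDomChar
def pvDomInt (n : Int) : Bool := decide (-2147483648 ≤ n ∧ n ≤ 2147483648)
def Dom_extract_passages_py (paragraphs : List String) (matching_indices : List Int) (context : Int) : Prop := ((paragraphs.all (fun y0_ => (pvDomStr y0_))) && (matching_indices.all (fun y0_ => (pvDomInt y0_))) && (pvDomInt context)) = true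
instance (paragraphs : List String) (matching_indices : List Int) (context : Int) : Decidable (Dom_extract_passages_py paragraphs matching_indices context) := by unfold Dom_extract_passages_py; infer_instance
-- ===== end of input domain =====

-- B replaces A's per-index window set + sort of all covered indices by sorting the matching
-- indices once and merging the clamped [i-context, i+context+1) intervals in a single pass.

-- ===== PORT A =====
-- one iteration of A's run-grouping loop ('for i in sorted(window): …')
def pvStepA (paragraphs : List String) (st : List String × List Int) (i : Int) : List String × List Int :=
  if st.2 ≠ [] ∧ PySem.List.pyGetD st.2 (-1) 0 + 1 < i then
    (st.1 ++ [PySem.Str.join "\n" (st.2.map (fun j => PySem.List.pyGetD paragraphs j ""))], [i])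
  else
    (st.1, st.2 ++ [i])

-- A's trailing 'if run: passages.append(...)'
def pvFinishA (paragraphs : List String) (st : List String × List Int) : List String :=
  if st.2 ≠ [] then
    st.1 ++ [PySem.Str.join "\n" (st.2.map (fun j => PySem.List.pyGetD paragraphs j ""))]
  else st.1

def extract_passages_py (paragraphs : List String) (matching_indices : List Int) (context : Int) : List String :=
  if matching_indices = [] then []
  else
    let n : Int := (paragraphs.length : Int)
    let window : PySem.Set Int := matching_indices.foldl
      (fun w i => (PySem.List.pyRange (max 0 (i - context)) (min n (i + context + 1)) 1).foldl
        (fun w j => PySem.Set.add w j) w)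
      PySem.Set.empty
    pvFinishA paragraphs ((PySem.List.sorted window (fun x => x) false).foldl (pvStepA paragraphs) ([], []))

-- ===== PORT B =====
-- one iteration of B's interval-merging loop ('for i in sorted(matching_indices): …')
def pvStepB (paragraphs : List String) (n context : Int) (st : List String × Option (Int × Int)) (i : Int) :
    List String × Option (Int × Int) :=
  let lo := max 0 (i - context)
  let hi := min n (i + context + 1)
  if hi ≤ lo then st
  else
    match st.2 with
    | none => (st.1, some (lo, hi))
    | some (clo, chi) =>
      if lo ≤ chi then (st.1, some (clo, max chi hi))
      else (st.1 ++ [PySem.Str.join "\n" (PySem.List.slice paragraphs (some clo) (some chi))], some (lo, hi))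

-- B's trailing 'if cur is not None: passages.append(...)'
def pvFinishB (paragraphs : List String) (st : List String × Option (Int × Int)) : List String :=
  match st.2 with
  | none => st.1
  | some (clo, chi) => st.1 ++ [PySem.Str.join "\n" (PySem.List.slice paragraphs (some clo) (some chi))]

def extract_passages_py_alt (paragraphs : List String) (matching_indices : List Int) (context : Int) : List String :=
  let n : Int := (paragraphs.length : Int)
  pvFinishB paragraphs ((PySem.List.sorted matching_indices (fun x => x) false).foldl
    (pvStepB paragraphs n context) ([], none))

-- ===== PRECONDITION & SPEC =====
def Spec_extract_passages_py (paragraphs : List String) (matching_indices : List Int) (context : Int) (out : List String) : Prop := out = extract_passages_py_alt paragraphs matching_indices context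
instance (paragraphs : List String) (matching_indices : List Int) (context : Int) (out : List String) : Decidable (Spec_extract_passages_py paragraphs matching_indices context out) := by unfold Spec_extract_passages_py; infer_instance

-- ===== CLAIM (what is proved, stated in full; the proofs are below) =====
def Claim_equal_extract_passages_py : Prop := ∀ (paragraphs : List String) (matching_indices : List Int) (context : Int), Dom_extract_passages_py paragraphs matching_indices context → Spec_extract_passages_py paragraphs matching_indices context (extract_passages_py paragraphs matching_indices context)

-- ===== LEMMAS AND PROOFS =====

-- B's merged-interval list, as a recursive function (mirrors B's fold state evolution)
def pvMerged (n context : Int) : Option (Int × Int) → List Int → List (Int × Int)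
  | cur, [] => match cur with | none => [] | some p => [p]
  | cur, i :: t =>
    let lo := max 0 (i - context)
    let hi := min n (i + context + 1)
    if hi ≤ lo then pvMerged n context cur t
    else
      match cur with
      | none => pvMerged n context (some (lo, hi)) t
      | some (clo, chi) =>
        if lo ≤ chi then pvMerged n context (some (clo, max chi hi)) t
        else (clo, chi) :: pvMerged n context (some (lo, hi)) t

-- A's run grouping, as a recursive function
def pvGroups (cur : List Int) : List Int → List (List Int)
  | [] => [cur]
  | i :: t =>
    if cur ≠ [] ∧ PySem.List.pyGetD cur (-1) 0 + 1 < i then cur :: pvGroups [i] t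
    else pvGroups (cur ++ [i]) t

def pvRenderA (paragraphs : List String) (run : List Int) : String :=
  PySem.Str.join "\n" (run.map (fun j => PySem.List.pyGetD paragraphs j ""))

def pvRenderB (paragraphs : List String) (p : Int × Int) : String :=
  PySem.Str.join "\n" (PySem.List.slice paragraphs (some p.1) (some p.2))

def pvFlat (M : List (Int × Int)) : List Int := M.flatMap (fun p => PySem.List.pyRange p.1 p.2 1)

-- well-formed merged interval lists: nonempty, inside [0,n], strictly gapped
def pvGoodM (n : Int) (M : List (Int × Int)) : Prop :=
  M.Pairwise (fun p q => p.2 < q.1) ∧ ∀ p ∈ M, 0 ≤ p.1 ∧ p.1 < p.2 ∧ p.2 ≤ n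

theorem pv_foldB_rec (paragraphs : List String) (n context : Int) :
    ∀ (l : List Int) (ps : List String) (cur : Option (Int × Int)),
    pvFinishB paragraphs (l.foldl (pvStepB paragraphs n context) (ps, cur))
    = ps ++ (pvMerged n context cur l).map (pvRenderB paragraphs) := by
  intro l
  induction l with
  | nil =>
    intro ps cur
    cases cur with
    | none => simp [pvMerged, pvFinishB]
    | some p => cases p with | mk a b => simp [pvMerged, pvRenderB, pvFinishB]
  | cons i t ih =>
    intro ps cur
    simp only [List.foldl_cons, pvMerged, pvStepB]
    by_cases hsk : min n (i + context + 1) ≤ max 0 (i - context)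
    · simp only [hsk, if_true]
      exact ih ps cur
    · simp only [hsk, if_false]
      cases cur with
      | none => exact ih ps (some (max 0 (i - context), min n (i + context + 1)))
      | some p =>
        cases p with
        | mk clo chi =>
          by_cases hm : max 0 (i - context) ≤ chi
          · simp only [hm, if_true]
            exact ih ps (some (clo, max chi (min n (i + context + 1))))
          · simp only [hm, if_false]
            rw [ih (ps ++ [PySem.Str.join "\n" (PySem.List.slice paragraphs (some clo) (some chi))]) (some (max 0 (i - context), min n (i + context + 1)))]
            simp [pvRenderB]

theorem pv_foldA_rec (paragraphs : List String) :
    ∀ (L : List Int) (ps : List String) (run : List Int), run ≠ [] →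
    pvFinishA paragraphs (L.foldl (pvStepA paragraphs) (ps, run))
    = ps ++ (pvGroups run L).map (pvRenderA paragraphs) := by
  intro L
  induction L with
  | nil =>
    intro ps run hr
    simp [pvGroups, pvRenderA, pvFinishA, hr]
  | cons i t ih =>
    intro ps run hr
    simp only [List.foldl_cons, pvGroups, pvStepA]
    by_cases hc : run ≠ [] ∧ PySem.List.pyGetD run (-1) 0 + 1 < i
    · rw [if_pos hc, if_pos hc]
      rw [ih (ps ++ [PySem.Str.join "\n" (run.map (fun j => PySem.List.pyGetD paragraphs j ""))]) [i] (by simp)]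
      simp [pvRenderA]
    · rw [if_neg hc, if_neg hc]
      exact ih ps (run ++ [i]) (by simp)

theorem pv_merged_some_spec (n context : Int) :
    ∀ (l : List Int) (clo chi : Int), l.Pairwise (· ≤ ·) →
    0 ≤ clo → clo < chi → chi ≤ n → (∀ i ∈ l, clo ≤ max 0 (i - context)) →
    ∃ chi' M', pvMerged n context (some (clo, chi)) l = (clo, chi') :: M' ∧ chi ≤ chi' ∧
      pvGoodM n ((clo, chi') :: M') ∧
      (∀ j : Int, j ∈ pvFlat ((clo, chi') :: M') ↔
        ((clo ≤ j ∧ j < chi) ∨ ∃ i ∈ l, max 0 (i - context) ≤ j ∧ j < min n (i + context + 1))) := by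
  intro l
  induction l with
  | nil =>
    intro clo chi _ h0 h1 h2 _
    refine ⟨chi, [], rfl, le_refl _, ⟨by simp, by simp; omega⟩, fun j => ?_⟩
    simp [pvFlat, PySem.List.mem_pyRange_one]
  | cons i t ih =>
    intro clo chi hsorted h0 h1 h2 hlo
    obtain ⟨hi_le, hts⟩ := List.pairwise_cons.mp hsorted
    have hloi : clo ≤ max 0 (i - context) := hlo i List.mem_cons_self
    by_cases hsk : min n (i + context + 1) ≤ max 0 (i - context)
    · -- empty clamped interval: skip i
      obtain ⟨chi', M', heq, hle, hgood, hmemf⟩ :=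
        ih clo chi hts h0 h1 h2 (fun x hx => hlo x (List.mem_cons_of_mem _ hx))
      refine ⟨chi', M', ?_, hle, hgood, fun j => ?_⟩
      · simp only [pvMerged]
        rw [if_pos hsk]
        exact heq
      · rw [hmemf j]
        constructor
        · rintro (h | ⟨x, hx, hj⟩)
          · exact Or.inl h
          · exact Or.inr ⟨x, List.mem_cons_of_mem _ hx, hj⟩
        · rintro (h | ⟨x, hx, hj⟩)
          · exact Or.inl h
          · rcases List.mem_cons.mp hx with rfl | hx'
            · exact absurd hj (by omega)
            · exact Or.inr ⟨x, hx', hj⟩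
    · by_cases hm : max 0 (i - context) ≤ chi
      · -- merge i into the current interval
        obtain ⟨chi', M', heq, hle, hgood, hmemf⟩ :=
          ih clo (max chi (min n (i + context + 1))) hts h0 (by omega) (by omega)
            (fun x hx => hlo x (List.mem_cons_of_mem _ hx))
        refine ⟨chi', M', ?_, by omega, hgood, fun j => ?_⟩
        · simp only [pvMerged]
          rw [if_neg hsk, if_pos hm]
          exact heq
        · rw [hmemf j]
          constructor
          · rintro (h | ⟨x, hx, hj⟩)
            · by_cases hjc : j < chi
              · exact Or.inl ⟨h.1, hjc⟩
              · exact Or.inr ⟨i, List.mem_cons_self, by omega⟩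
            · exact Or.inr ⟨x, List.mem_cons_of_mem _ hx, hj⟩
          · rintro (h | ⟨x, hx, hj⟩)
            · exact Or.inl ⟨h.1, by omega⟩
            · rcases List.mem_cons.mp hx with rfl | hx'
              · exact Or.inl ⟨by omega, by omega⟩
              · exact Or.inr ⟨x, hx', hj⟩
      · -- gap: close the current interval, start a new one at i
        have hxs : ∀ x ∈ t, max 0 (i - context) ≤ max 0 (x - context) := by
          intro x hx
          have := hi_le x hx
          omega
        obtain ⟨chi'', M'', heq, hle2, hgood2, hmemf⟩ :=
          ih (max 0 (i - context)) (min n (i + context + 1)) hts (by omega) (by omega)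
            (by omega) hxs
        obtain ⟨hpw2, hmem2⟩ := hgood2
        refine ⟨chi, (max 0 (i - context), chi'') :: M'', ?_, le_refl _, ?_, fun j => ?_⟩
        · simp only [pvMerged]
          rw [if_neg hsk, if_neg hm]
          rw [heq]
        · refine ⟨List.pairwise_cons.mpr ⟨?_, hpw2⟩, ?_⟩
          · intro q hq
            obtain ⟨q1, q2⟩ := q
            rcases List.mem_cons.mp hq with hq1 | hq'
            · injection hq1 with e1 e2
              show chi < q1
              omega
            · have hh := (List.pairwise_cons.mp hpw2).1 (q1, q2) hq'
              show chi < q1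
              have : min n (i + context + 1) ≤ chi'' := hle2
              have : chi'' < q1 := hh
              omega
          · intro p hp
            rcases List.mem_cons.mp hp with rfl | hp'
            · exact ⟨h0, h1, h2⟩
            · rcases List.mem_cons.mp hp' with rfl | hp''
              · exact hmem2 _ List.mem_cons_self
              · exact hmem2 _ (List.mem_cons_of_mem _ hp'')
        · have hflat : pvFlat ((clo, chi) :: (max 0 (i - context), chi'') :: M'')
              = PySem.List.pyRange clo chi 1 ++ pvFlat ((max 0 (i - context), chi'') :: M'') := by
            simp [pvFlat]
          rw [hflat, List.mem_append, PySem.List.mem_pyRange_one, hmemf j]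
          constructor
          · rintro (h | (h | ⟨x, hx, hj⟩))
            · exact Or.inl h
            · exact Or.inr ⟨i, List.mem_cons_self, h⟩
            · exact Or.inr ⟨x, List.mem_cons_of_mem _ hx, hj⟩
          · rintro (h | ⟨x, hx, hj⟩)
            · exact Or.inl h
            · rcases List.mem_cons.mp hx with rfl | hx'
              · exact Or.inr (Or.inl hj)
              · exact Or.inr (Or.inr ⟨x, hx', hj⟩)

theorem pv_merged_none_spec (n context : Int) :
    ∀ (l : List Int), l.Pairwise (· ≤ ·) →
    pvGoodM n (pvMerged n context none l) ∧
      (∀ j : Int, j ∈ pvFlat (pvMerged n context none l) ↔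
        ∃ i ∈ l, max 0 (i - context) ≤ j ∧ j < min n (i + context + 1)) := by
  intro l
  induction l with
  | nil =>
    refine fun _ => ⟨⟨by simp [pvMerged], by simp [pvMerged]⟩, fun j => ?_⟩
    simp [pvMerged, pvFlat]
  | cons i t ih =>
    intro hsorted
    obtain ⟨hi_le, hts⟩ := List.pairwise_cons.mp hsorted
    by_cases hsk : min n (i + context + 1) ≤ max 0 (i - context)
    · obtain ⟨hgood, hmemf⟩ := ih hts
      have hstep : pvMerged n context none (i :: t) = pvMerged n context none t := by
        simp only [pvMerged]
        rw [if_pos hsk]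
      rw [hstep]
      refine ⟨hgood, fun j => ?_⟩
      rw [hmemf j]
      constructor
      · rintro ⟨x, hx, hj⟩
        exact ⟨x, List.mem_cons_of_mem _ hx, hj⟩
      · rintro ⟨x, hx, hj⟩
        rcases List.mem_cons.mp hx with rfl | hx'
        · exact absurd hj (by omega)
        · exact ⟨x, hx', hj⟩
    · have hxs : ∀ x ∈ t, max 0 (i - context) ≤ max 0 (x - context) := by
        intro x hx
        have := hi_le x hx
        omega
      obtain ⟨chi', M', heq, hle, hgood, hmemf⟩ :=
        pv_merged_some_spec n context t (max 0 (i - context)) (min n (i + context + 1)) hts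
          (by omega) (by omega) (by omega) hxs
      have hstep : pvMerged n context none (i :: t)
          = pvMerged n context (some (max 0 (i - context), min n (i + context + 1))) t := by
        simp only [pvMerged]
        rw [if_neg hsk]
      rw [hstep, heq]
      refine ⟨hgood, fun j => ?_⟩
      rw [hmemf j]
      constructor
      · rintro (h | ⟨x, hx, hj⟩)
        · exact ⟨i, List.mem_cons_self, h⟩
        · exact ⟨x, List.mem_cons_of_mem _ hx, hj⟩
      · rintro ⟨x, hx, hj⟩
        rcases List.mem_cons.mp hx with rfl | hx'
        · exact Or.inl hj
        · exact Or.inr ⟨x, hx', hj⟩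

theorem pv_flat_pairwise (n : Int) : ∀ (M : List (Int × Int)), pvGoodM n M →
    (pvFlat M).Pairwise (· < ·) := by
  intro M
  induction M with
  | nil => intro _; simp [pvFlat]
  | cons p rest ih =>
    rintro ⟨hpw, hmem⟩
    simp only [pvFlat, List.flatMap_cons]
    rw [List.pairwise_append]
    refine ⟨PySem.List.pairwise_lt_pyRange_one _ _, ih ⟨hpw.sublist (List.sublist_cons_self _ _),
      fun q hq => hmem q (List.mem_cons_of_mem _ hq)⟩, ?_⟩
    intro a ha b hb
    rw [PySem.List.mem_pyRange_one] at ha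
    rcases List.mem_flatMap.mp hb with ⟨q, hq, hbq⟩
    rw [PySem.List.mem_pyRange_one] at hbq
    have hlt : p.2 < q.1 := (List.pairwise_cons.mp hpw).1 q hq
    omega

theorem pv_window_spec (n context : Int) :
    ∀ (idx : List Int) (w : List Int), w.Nodup →
    (idx.foldl (fun w i => (PySem.List.pyRange (max 0 (i - context)) (min n (i + context + 1)) 1).foldl
        (fun w j => PySem.Set.add w j) w) w).Nodup ∧
    ∀ j : Int, j ∈ idx.foldl (fun w i => (PySem.List.pyRange (max 0 (i - context)) (min n (i + context + 1)) 1).foldl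
        (fun w j => PySem.Set.add w j) w) w ↔
      j ∈ w ∨ ∃ i ∈ idx, max 0 (i - context) ≤ j ∧ j < min n (i + context + 1) := by
  intro idx
  induction idx with
  | nil => intro w hw; simpa using hw
  | cons i t ih =>
    intro w hw
    simp only [List.foldl_cons]
    have hupd : (PySem.List.pyRange (max 0 (i - context)) (min n (i + context + 1)) 1).foldl
        (fun w j => PySem.Set.add w j) w
        = PySem.Set.update w (PySem.List.pyRange (max 0 (i - context)) (min n (i + context + 1)) 1) := rfl
    rw [hupd]
    obtain ⟨h1, h2⟩ := ih (PySem.Set.update w (PySem.List.pyRange (max 0 (i - context)) (min n (i + context + 1)) 1)) (PySem.Set.nodup_update _ _ hw)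
    refine ⟨h1, fun j => ?_⟩
    rw [h2 j, PySem.Set.mem_update, PySem.List.mem_pyRange_one]
    constructor
    · rintro ((h | h) | ⟨x, hx, hj⟩)
      · exact Or.inl h
      · exact Or.inr ⟨i, List.mem_cons_self, h⟩
      · exact Or.inr ⟨x, List.mem_cons_of_mem _ hx, hj⟩
    · rintro (h | ⟨x, hx, hj⟩)
      · exact Or.inl (Or.inl h)
      · rcases List.mem_cons.mp hx with rfl | hx
        · exact Or.inl (Or.inr hj)
        · exact Or.inr ⟨x, hx, hj⟩

theorem pv_groups_extend :
    ∀ (k : Nat) (lo hi : Int) (rest : List Int), lo < hi →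
    pvGroups (PySem.List.pyRange lo hi 1) (PySem.List.pyRange hi (hi + (k : Int)) 1 ++ rest)
      = pvGroups (PySem.List.pyRange lo (hi + (k : Int)) 1) rest := by
  intro k
  induction k with
  | zero =>
    intro lo hi rest h
    rw [show ((0 : Nat) : Int) = 0 by rfl]
    rw [PySem.List.pyRange_one_eq_nil (by omega : hi + 0 ≤ hi)]
    simp
  | succ m ih =>
    intro lo hi rest h
    rw [PySem.List.pyRange_one_cons (by omega : hi < hi + ((m + 1 : Nat) : Int))]
    simp only [List.cons_append, pvGroups]
    have hne : PySem.List.pyRange lo hi 1 ≠ [] := by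
      rw [PySem.List.pyRange_one_cons h]; simp
    have hlast : PySem.List.pyGetD (PySem.List.pyRange lo hi 1) (-1) 0 = hi - 1 := by
      have : PySem.List.pyRange lo hi 1 = PySem.List.pyRange lo (hi - 1) 1 ++ [hi - 1] := by
        have := PySem.List.pyRange_one_succ_right (a := lo) (b := hi - 1) (by omega)
        simpa using this
      rw [this, PySem.List.pyGetD_neg_one_append_singleton]
    have hcond : ¬ (PySem.List.pyRange lo hi 1 ≠ [] ∧
        PySem.List.pyGetD (PySem.List.pyRange lo hi 1) (-1) 0 + 1 < hi) := by
      rw [hlast]; simp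
    rw [if_neg hcond]
    have hstep : PySem.List.pyRange lo hi 1 ++ [hi] = PySem.List.pyRange lo (hi + 1) 1 := by
      rw [PySem.List.pyRange_one_succ_right (by omega : lo ≤ hi)]
    rw [hstep]
    have harg : PySem.List.pyRange (hi + 1) (hi + ((m + 1 : Nat) : Int)) 1
        = PySem.List.pyRange (hi + 1) ((hi + 1) + (m : Int)) 1 := by
      congr 1
      push_cast
      ring
    rw [harg, ih lo (hi + 1) rest (by omega)]
    congr 2
    push_cast
    ring

theorem pv_groups_flat (n : Int) :
    ∀ (M' : List (Int × Int)) (lo chi : Int), pvGoodM n ((lo, chi) :: M') →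
    pvGroups (PySem.List.pyRange lo chi 1) (pvFlat M')
      = PySem.List.pyRange lo chi 1 :: M'.map (fun p => PySem.List.pyRange p.1 p.2 1) := by
  intro M'
  induction M' with
  | nil =>
    intro lo chi _
    simp [pvFlat, pvGroups]
  | cons q rest ih =>
    intro lo chi hg
    obtain ⟨clo', chi'⟩ := q
    obtain ⟨hpw, hmem⟩ := hg
    have hhead : chi < clo' := (List.pairwise_cons.mp hpw).1 (clo', chi') List.mem_cons_self
    have hlochi : lo < chi := (hmem _ List.mem_cons_self).2.1
    have hq : clo' < chi' := (hmem _ (List.mem_cons_of_mem _ List.mem_cons_self)).2.1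
    have hflat : pvFlat ((clo', chi') :: rest)
        = clo' :: (PySem.List.pyRange (clo' + 1) chi' 1 ++ pvFlat rest) := by
      simp only [pvFlat, List.flatMap_cons]
      rw [PySem.List.pyRange_one_cons hq]
      simp
    rw [hflat]
    have hne : PySem.List.pyRange lo chi 1 ≠ [] := by
      rw [PySem.List.pyRange_one_cons hlochi]; simp
    have hlast : PySem.List.pyGetD (PySem.List.pyRange lo chi 1) (-1) 0 = chi - 1 := by
      have heq : PySem.List.pyRange lo chi 1 = PySem.List.pyRange lo (chi - 1) 1 ++ [chi - 1] := by
        have := PySem.List.pyRange_one_succ_right (a := lo) (b := chi - 1) (by omega)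
        simpa using this
      rw [heq, PySem.List.pyGetD_neg_one_append_singleton]
    simp only [pvGroups]
    rw [if_pos ⟨hne, by rw [hlast]; omega⟩]
    have hsingle : ([clo'] : List Int) = PySem.List.pyRange clo' (clo' + 1) 1 := by
      rw [PySem.List.pyRange_one_cons (by omega), PySem.List.pyRange_one_eq_nil (by omega)]
    rw [hsingle]
    have hext := pv_groups_extend ((chi' - (clo' + 1)).toNat) clo' (clo' + 1) (pvFlat rest) (by omega)
    rw [show (clo' + 1) + ((chi' - (clo' + 1)).toNat : Int) = chi' by omega] at hext
    rw [hext]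
    have htail : pvGoodM n ((clo', chi') :: rest) := ⟨hpw.sublist (List.sublist_cons_self _ _),
      fun p hp => hmem p (List.mem_cons_of_mem _ hp)⟩
    rw [ih clo' chi' htail]
    simp

theorem pv_render_eq (paragraphs : List String) (lo hi : Int)
    (h0 : 0 ≤ lo) (h1 : lo ≤ hi) (h2 : hi ≤ (paragraphs.length : Int)) :
    pvRenderA paragraphs (PySem.List.pyRange lo hi 1) = pvRenderB paragraphs (lo, hi) := by
  simp only [pvRenderA, pvRenderB]
  congr 1
  rw [PySem.List.slice_toNat paragraphs h0 (le_trans h0 h1), PySem.List.pyRange_one, List.map_map]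
  apply List.ext_getElem
  · simp; omega
  · intro k hk1 hk2
    simp only [List.getElem_map, List.getElem_range, Function.comp_apply, List.getElem_take,
      List.getElem_drop]
    have hlen : (k : Int) < hi - lo := by
      simp only [List.length_map, List.length_range] at hk1
      omega
    rw [PySem.List.pyGetD_eq_getElem paragraphs (i := lo + (k : Int)) "" (by omega) (by
      omega)]
    congr 1
    omega

-- ===== VERDICT (by name: the statement is the Claim_ definition above) =====
theorem extract_passages_py_spec : Claim_equal_extract_passages_py := by
  intro paragraphs matching_indices context _
  show extract_passages_py paragraphs matching_indices context
      = extract_passages_py_alt paragraphs matching_indices context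
  by_cases hidx : matching_indices = []
  · subst hidx
    rfl
  · -- name the pieces
    have hsortedidx : (PySem.List.sorted matching_indices (fun x => x) false).Pairwise (· ≤ ·) :=
      PySem.List.sorted_pairwise matching_indices (fun x => x)
    obtain ⟨hgood, hmem⟩ := pv_merged_none_spec ((paragraphs.length : Int)) context
      (PySem.List.sorted matching_indices (fun x => x) false) hsortedidx
    obtain ⟨hnodup, hwmem⟩ := pv_window_spec ((paragraphs.length : Int)) context
      matching_indices (PySem.Set.empty) List.nodup_nil
    -- B's value
    have hB : extract_passages_py_alt paragraphs matching_indices context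
        = (pvMerged ((paragraphs.length : Int)) context none
            (PySem.List.sorted matching_indices (fun x => x) false)).map (pvRenderB paragraphs) := by
      have h := pv_foldB_rec paragraphs ((paragraphs.length : Int)) context
        (PySem.List.sorted matching_indices (fun x => x) false) [] none
      simpa [extract_passages_py_alt] using h
    -- A's sorted window is the flattening of B's merged intervals
    have hF : PySem.List.sorted (matching_indices.foldl
        (fun w i => (PySem.List.pyRange (max 0 (i - context))
          (min ((paragraphs.length : Int)) (i + context + 1)) 1).foldl
          (fun w j => PySem.Set.add w j) w) (PySem.Set.empty)) (fun x => x) false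
        = pvFlat (pvMerged ((paragraphs.length : Int)) context none
            (PySem.List.sorted matching_indices (fun x => x) false)) := by
      apply PySem.List.sorted_eq_of_perm_of_pairwise_lt
      · rw [List.perm_ext_iff_of_nodup
          ((pv_flat_pairwise ((paragraphs.length : Int)) _ hgood).imp (fun h => ne_of_lt h)) hnodup]
        intro a
        rw [hmem a, hwmem a]
        simp only [PySem.Set.empty, List.not_mem_nil, false_or]
        constructor
        · rintro ⟨x, hx, hj⟩
          exact ⟨x, (PySem.List.mem_sorted _ _ _ _).mp hx, hj⟩
        · rintro ⟨x, hx, hj⟩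
          exact ⟨x, (PySem.List.mem_sorted _ _ _ _).mpr hx, hj⟩
      · exact pv_flat_pairwise ((paragraphs.length : Int)) _ hgood
    have hA : extract_passages_py paragraphs matching_indices context
        = pvFinishA paragraphs ((pvFlat (pvMerged ((paragraphs.length : Int)) context none
            (PySem.List.sorted matching_indices (fun x => x) false))).foldl
            (pvStepA paragraphs) ([], [])) := by
      simp only [extract_passages_py]
      rw [if_neg hidx, hF]
    rw [hA, hB]
    -- case on the merged interval list
    rcases hM : pvMerged ((paragraphs.length : Int)) context none
        (PySem.List.sorted matching_indices (fun x => x) false) with _ | ⟨⟨lo, chi⟩, M'⟩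
    · simp [pvFlat, pvFinishA]
    · rw [hM] at hgood
      obtain ⟨hpw, hmemb⟩ := hgood
      have hb := hmemb (lo, chi) List.mem_cons_self
      have hflat : pvFlat ((lo, chi) :: M')
          = lo :: (PySem.List.pyRange (lo + 1) chi 1 ++ pvFlat M') := by
        simp only [pvFlat, List.flatMap_cons]
        rw [PySem.List.pyRange_one_cons hb.2.1]
        simp
      rw [hflat]
      simp only [List.foldl_cons]
      have hfirst : pvStepA paragraphs ([], []) lo = ([], [lo]) := by
        simp [pvStepA]
      rw [hfirst, pv_foldA_rec paragraphs _ [] [lo] (by simp)]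
      have hsingle : ([lo] : List Int) = PySem.List.pyRange lo (lo + 1) 1 := by
        rw [PySem.List.pyRange_one_cons (by omega), PySem.List.pyRange_one_eq_nil (by omega)]
      rw [hsingle]
      have hext := pv_groups_extend ((chi - (lo + 1)).toNat) lo (lo + 1) (pvFlat M') (by omega)
      rw [show (lo + 1) + ((chi - (lo + 1)).toNat : Int) = chi by omega] at hext
      rw [hext, pv_groups_flat ((paragraphs.length : Int)) M' lo chi ⟨hpw, hmemb⟩]
      simp only [List.nil_append, List.map_cons, List.map_map]
      congr 1
      · exact pv_render_eq paragraphs lo chi hb.1 (le_of_lt hb.2.1) hb.2.2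
      · apply List.map_congr_left
        intro p hp
        have hbp := hmemb p (List.mem_cons_of_mem _ hp)
        exact pv_render_eq paragraphs p.1 p.2 hbp.1 (le_of_lt hbp.2.1) hbp.2.2
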